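-- pv_equiv track=rewrite | github.com/Dudomon/Portfolio | IA de Duas Cabeças Trader - PYTHON/oldbak.py | _determine_phase_from_steps
-- ===== SOURCE A (Python) =====
-- def _determine_phase_from_steps(steps):
--     """Determinar índice da fase baseado nos steps (dobro do número de barras)"""
--     # 🎯 CALCULAR TOTAL BASEADO NO DATASET FINAL (723,547 barras * 2 = 1,447,094 steps)
--     total_steps = 1447094  # Dobro do dataset final sem preços estáticos
--
--     # Fases: 20%, 25%, 25%, 20%, 10% do total
--     phase_thresholds = [
--         int(total_steps * 0.20),   # Fase 1: 0 - 289k (20% do total)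
--         int(total_steps * 0.45),   # Fase 2: 289k - 651k (25% adicional)
--         int(total_steps * 0.70),   # Fase 3: 651k - 1.013M (25% adicional)
--         int(total_steps * 0.90),   # Fase 4: 1.013M - 1.302M (20% adicional)
--         total_steps                # Fase 5: 1.302M - 1.447M (10% adicional)
--     ]
--
--     for i, threshold in enumerate(phase_thresholds):
--         if steps < threshold:
--             return i
--
--     # Se passou de todas as fases, está na última
--     return len(phase_thresholds) - 1
-- ===== SOURCE B (Python) =====
-- import bisect
--
-- def _determine_phase_from_steps(steps):
--     """Determinar índice da fase baseado nos steps (dobro do número de barras)"""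
--     total_steps = 1447094
--     phase_thresholds = [
--         int(total_steps * 0.20),
--         int(total_steps * 0.45),
--         int(total_steps * 0.70),
--         int(total_steps * 0.90),
--         total_steps
--     ]
--     return min(bisect.bisect_right(phase_thresholds, steps),
--                len(phase_thresholds) - 1)
-- ===== Notes on version B (the rewrite author's own statement) =====
-- stated objective: idiomatic
-- what changed: Replaces the linear enumerate-and-early-return scan over the thresholds with a single bisect.bisect_right lookup capped by min at the last index.
import Mathlib
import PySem

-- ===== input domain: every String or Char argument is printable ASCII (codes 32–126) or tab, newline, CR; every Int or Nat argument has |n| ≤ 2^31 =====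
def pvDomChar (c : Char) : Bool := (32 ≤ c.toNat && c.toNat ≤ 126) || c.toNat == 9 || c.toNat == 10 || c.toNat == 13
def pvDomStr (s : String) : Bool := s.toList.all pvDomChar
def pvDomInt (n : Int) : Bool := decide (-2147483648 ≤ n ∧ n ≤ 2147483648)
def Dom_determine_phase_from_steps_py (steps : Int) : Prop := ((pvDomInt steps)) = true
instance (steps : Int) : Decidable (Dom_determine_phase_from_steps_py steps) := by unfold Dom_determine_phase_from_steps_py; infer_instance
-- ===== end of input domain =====

-- ===== PORT A =====
-- B replaces A's linear enumerate-and-early-return scan with a capped bisect_right rank lookup.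
-- Port of A: the float products int(1447094*0.20) etc. are written as their exact integer values.
def pvPhaseLoop (steps : Int) : List (Int × Int) → Int
  | [] => 5 - 1
  | (i, threshold) :: rest => if steps < threshold then i else pvPhaseLoop steps rest

def determine_phase_from_steps_py (steps : Int) : Int :=
  pvPhaseLoop steps (PySem.List.enumerate [(289418 : Int), 651192, 1012965, 1302384, 1447094])

-- ===== PORT B =====
-- bisect.bisect_right on a sorted list returns the number of elements ≤ x; the list here is
-- sorted, so the library call is ported as that count (countP), then capped by min as in Source B.
def determine_phase_from_steps_py_alt (steps : Int) : Int :=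
  let phase_thresholds : List Int := [289418, 651192, 1012965, 1302384, 1447094]
  min ((phase_thresholds.countP (fun t => t ≤ steps) : Int)) ((phase_thresholds.length : Int) - 1)

-- ===== PRECONDITION & SPEC =====
def Spec_determine_phase_from_steps_py (steps : Int) (out : Int) : Prop := out = determine_phase_from_steps_py_alt steps
instance (steps : Int) (out : Int) : Decidable (Spec_determine_phase_from_steps_py steps out) := by unfold Spec_determine_phase_from_steps_py; infer_instance

-- ===== CLAIM (what is proved, stated in full; the proofs are below) =====
def Claim_equal_determine_phase_from_steps_py : Prop := ∀ (steps : Int), Dom_determine_phase_from_steps_py steps → Spec_determine_phase_from_steps_py steps (determine_phase_from_steps_py steps)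

-- ===== LEMMAS AND PROOFS =====

-- ===== VERDICT (by name: the statement is the Claim_ definition above) =====
set_option maxHeartbeats 1000000 in
theorem determine_phase_from_steps_py_spec : Claim_equal_determine_phase_from_steps_py := by
  intro steps _
  unfold Spec_determine_phase_from_steps_py determine_phase_from_steps_py
    determine_phase_from_steps_py_alt
  simp only [PySem.List.enumerate_cons, PySem.List.enumerate_nil, pvPhaseLoop, List.countP,
    List.countP.go, List.length, Bool.cond_decide]
  split_ifs <;> omega
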